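-- pv_equiv track=rewrite | github.com/Ely-S/PatientPunk | src/utilities/graph.py | find_parent_cycles
-- ===== SOURCE A (Python) =====
-- from typing import Hashable, Mapping
--
-- def find_parent_cycles(
--     parent_map: Mapping[Hashable, Hashable | None],
-- ) -> list[list[Hashable]]:
--     """Return every cycle in a parent-map (forest with possibly back-edges).
--
--     Iterative DFS with white/gray/black coloring; O(N). Each returned
--     list is a single cycle as a sequence of nodes ending with the node
--     that closes the cycle (so ``[a, b, c, a]`` for the cycle a→b→c→a).
--     Returns an empty list if the graph is a clean forest.
--
--     Use cases:
--
--     - Fail-fast guard before recursive traversal: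
--       ``cycles = find_parent_cycles(parent_map)``
--       ``if cycles: raise ValueError("cycle: " + " -> ".join(cycles[0]))``
--     - Audit report listing every cycle present in the data.
--     """
--     UNVISITED, VISITING, DONE = 0, 1, 2
--     color: dict[Hashable, int] = {}
--     cycles: list[list[Hashable]] = []
--     for start in parent_map:
--         if color.get(start, UNVISITED) != UNVISITED:
--             continue
--         stack: list[Hashable] = [start]
--         path: list[Hashable] = []
--         while stack:
--             node = stack[-1]
--             c = color.get(node, UNVISITED)
--             if c == UNVISITED:
--                 color[node] = VISITING
--                 path.append(node)
--                 parent = parent_map.get(node)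
--                 if parent is not None and parent in parent_map:
--                     pcol = color.get(parent, UNVISITED)
--                     if pcol == VISITING:
--                         # back-edge into the active path -> cycle
--                         i = path.index(parent)
--                         cycles.append(path[i:] + [parent])
--                         color[node] = DONE
--                         if path and path[-1] == node:
--                             path.pop()
--                         stack.pop()
--                         continue
--                     if pcol == UNVISITED:
--                         stack.append(parent)
--                         continue
--                 # parent missing, NULL, or already DONE -> this node is finished
--                 color[node] = DONE
--                 if path and path[-1] == node:
--                     path.pop()
--                 stack.pop()
--             else:
--                 if path and path[-1] == node:
--                     path.pop()
--                 stack.pop()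
--                 color[node] = DONE
--     return cycles
-- ===== SOURCE B (Python) =====
-- from typing import Hashable, Mapping
--
-- def find_parent_cycles(
--     parent_map: Mapping[Hashable, Hashable | None],
-- ) -> list[list[Hashable]]:
--     """Chain-walk version: since each node has at most one parent, walk the
--     unique parent chain with a plain while loop (no explicit DFS stack, no
--     unwinding branch), keeping a position index for O(1) cycle extraction."""
--     UNVISITED, VISITING, DONE = 0, 1, 2
--     color: dict[Hashable, int] = {}
--     cycles: list[list[Hashable]] = []
--     for start in parent_map:
--         if color.get(start, UNVISITED) != UNVISITED:
--             continue
--         path: list[Hashable] = []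
--         pos: dict[Hashable, int] = {}
--         node = start
--         while True:
--             color[node] = VISITING
--             pos[node] = len(path)
--             path.append(node)
--             parent = parent_map.get(node)
--             if parent is None or parent not in parent_map:
--                 break
--             pcol = color.get(parent, UNVISITED)
--             if pcol == VISITING:
--                 cycles.append(path[pos[parent]:] + [parent])
--                 break
--             if pcol != UNVISITED:
--                 break
--             node = parent
--         for n in path:
--             color[n] = DONE
--     return cycles
-- ===== Notes on version B (the rewrite author's own statement) =====
-- stated objective: simpler
-- what changed: Replaces the explicit DFS stack with white/gray/black coloring and its separate unwinding else-branch by a plain while-loop walk of the unique parent chain (each node has at most one parent), keeping a position dict for cycle extraction and marking the walked path DONE afterwards.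
import Mathlib
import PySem

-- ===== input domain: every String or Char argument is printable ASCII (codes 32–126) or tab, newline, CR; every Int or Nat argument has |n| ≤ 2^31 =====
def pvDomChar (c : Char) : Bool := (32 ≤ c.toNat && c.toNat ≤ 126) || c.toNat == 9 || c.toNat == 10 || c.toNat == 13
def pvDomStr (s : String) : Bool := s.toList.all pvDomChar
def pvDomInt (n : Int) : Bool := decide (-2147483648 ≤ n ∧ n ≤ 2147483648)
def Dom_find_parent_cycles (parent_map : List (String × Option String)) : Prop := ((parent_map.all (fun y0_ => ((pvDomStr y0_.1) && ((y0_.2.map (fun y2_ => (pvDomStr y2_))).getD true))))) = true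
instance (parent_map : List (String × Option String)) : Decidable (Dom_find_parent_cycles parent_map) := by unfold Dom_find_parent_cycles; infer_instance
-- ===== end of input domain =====

-- B replaces A's explicit DFS stack and unwinding else-branch by a direct walk
-- of the unique parent chain (simpler decomposition; same O(n) cost).

-- ===== PORT A =====
-- counting lemmas used by the termination measures of the two loop ports
lemma countP_update_lt (l : List String) (f : String → Int) (node : String) (v : Int)
    (hm : node ∈ l) (h0 : f node = 0) (hv : v ≠ 0) :
    l.countP (fun k => (if k = node then v else f k) == 0) < l.countP (fun k => f k == 0) := by
  induction l with
  | nil => cases hm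
  | cons a t ih =>
    rw [List.countP_cons, List.countP_cons]
    by_cases ha : a = node
    · subst ha
      have h1 : ((if a = a then v else f a) == 0) = false := by simp [hv]
      have h2 : (f a == 0) = true := by simp [h0]
      rw [h1, h2]
      have hle : t.countP (fun k => (if k = a then v else f k) == 0)
          ≤ t.countP (fun k => f k == 0) := by
        apply List.countP_mono_left
        intro x _ hx
        by_cases hxn : x = a
        · simp [hxn, hv] at hx
        · simpa [hxn] using hx
      simp only [if_true, if_false, Bool.false_eq_true]
      omega
    · have hmt : node ∈ t := by
        rcases List.mem_cons.mp hm with h | h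
        · exact absurd h.symm ha
        · exact h
      have h1 : ((if a = node then v else f a) == 0) = (f a == 0) := by simp [ha]
      rw [h1]
      have := ih hmt
      omega

lemma countU_insert_lt (pm : PySem.Dict String (Option String)) (c : PySem.Dict String Int)
    (node : String) (v : Int) (hm : node ∈ pm.keys) (h0 : c.getD node 0 = 0) (hv : v ≠ 0) :
    pm.keys.countP (fun k => (c.insert node v).getD k 0 == 0)
      < pm.keys.countP (fun k => c.getD k 0 == 0) := by
  have hcong : pm.keys.countP (fun k => (c.insert node v).getD k 0 == 0)
      = pm.keys.countP (fun k => (if k = node then v else c.getD k 0) == 0) := by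
    apply List.countP_congr
    intro a _
    rw [PySem.Dict.getD_insert]
  rw [hcong]
  exact countP_update_lt _ _ _ _ hm h0 hv

lemma countU_insert_eq (pm : PySem.Dict String (Option String)) (c : PySem.Dict String Int)
    (node : String) (v : Int) (h0 : c.getD node 0 ≠ 0) (hv : v ≠ 0) :
    pm.keys.countP (fun k => (c.insert node v).getD k 0 == 0)
      = pm.keys.countP (fun k => c.getD k 0 == 0) := by
  apply List.countP_congr
  intro a _
  rw [PySem.Dict.getD_insert]
  by_cases ha : a = node
  · rw [ha]; simp [hv, h0]
  · simp [ha]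


-- Python: `if path and path[-1] == node: path.pop()`
def popIfLast (l : List String) (x : String) : List String :=
  match l.getLast? with
  | some y => if y = x then l.dropLast else l
  | none => l

-- The `while stack:` loop of A, as well-founded recursion.  The measure is
-- (number of keys still UNVISITED, length of the stack); the proof argument
-- `hstack` (every stack entry is a key of the map) is what makes the measure
-- decrease, so the recursion carries it.
def fpcA_loop (pm : PySem.Dict String (Option String)) (color : PySem.Dict String Int)
    (cycles : List (List String)) (stack path : List String)
    (hstack : ∀ x ∈ stack, x ∈ pm.keys) :
    PySem.Dict String Int × List (List String) :=
  if hs : stack = [] then (color, cycles)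
  else
    -- node = stack[-1]
    have hnode : stack.getLast hs ∈ pm.keys := hstack _ (List.getLast_mem hs)
    if hc : color.getD (stack.getLast hs) 0 = 0 then
      -- color[node] = VISITING; path.append(node); parent = parent_map.get(node)
      match pm.getD (stack.getLast hs) none with
      | some parent =>
        if hpin : pm.contains parent then
          if (color.insert (stack.getLast hs) 1).getD parent 0 = 1 then
            -- back-edge into the active path -> cycle; `path.index(parent)` cannot
            -- raise here (parent is VISITING, hence on the appended path), so the
            -- `.getD 0` default is unreachable
            fpcA_loop pm ((color.insert (stack.getLast hs) 1).insert (stack.getLast hs) 2)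
              (cycles ++ [PySem.List.slice (path ++ [stack.getLast hs])
                  (some ((PySem.List.index? (path ++ [stack.getLast hs]) parent).getD 0 : Int)) none
                ++ [parent]])
              stack.dropLast (popIfLast (path ++ [stack.getLast hs]) (stack.getLast hs))
              (fun x hx => hstack x (List.mem_of_mem_dropLast hx))
          else if (color.insert (stack.getLast hs) 1).getD parent 0 = 0 then
            -- stack.append(parent)
            fpcA_loop pm (color.insert (stack.getLast hs) 1) cycles (stack ++ [parent])
              (path ++ [stack.getLast hs])
              (fun x hx => by
                rcases List.mem_append.mp hx with h | h
                · exact hstack x h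
                · simpa [List.mem_singleton.mp h] using (PySem.Dict.contains_iff_mem_keys _ _).mp hpin)
          else
            -- parent already DONE -> this node is finished
            fpcA_loop pm ((color.insert (stack.getLast hs) 1).insert (stack.getLast hs) 2) cycles
              stack.dropLast (popIfLast (path ++ [stack.getLast hs]) (stack.getLast hs))
              (fun x hx => hstack x (List.mem_of_mem_dropLast hx))
        else
          -- parent not a key -> finished
          fpcA_loop pm ((color.insert (stack.getLast hs) 1).insert (stack.getLast hs) 2) cycles
            stack.dropLast (popIfLast (path ++ [stack.getLast hs]) (stack.getLast hs))
            (fun x hx => hstack x (List.mem_of_mem_dropLast hx))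
      | none =>
          -- parent is NULL -> finished
          fpcA_loop pm ((color.insert (stack.getLast hs) 1).insert (stack.getLast hs) 2) cycles
            stack.dropLast (popIfLast (path ++ [stack.getLast hs]) (stack.getLast hs))
            (fun x hx => hstack x (List.mem_of_mem_dropLast hx))
    else
      -- else-branch: pop and mark DONE
      fpcA_loop pm (color.insert (stack.getLast hs) 2) cycles stack.dropLast
        (popIfLast path (stack.getLast hs))
        (fun x hx => hstack x (List.mem_of_mem_dropLast hx))
termination_by (pm.keys.countP (fun k => color.getD k 0 == 0), stack.length)
decreasing_by
  all_goals simp_wf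
  all_goals first
    | exact Prod.Lex.left _ _ (by
        rw [PySem.Dict.insert_insert_self]
        exact countU_insert_lt pm color _ 2 hnode hc (by decide))
    | exact Prod.Lex.left _ _ (countU_insert_lt pm color _ 1 hnode hc (by decide))
    | (rw [countU_insert_eq pm color _ 2 hc (by decide)]
       exact Prod.Lex.right _ (Nat.sub_lt (List.length_pos_iff.mpr hs) one_pos))

-- `for start in parent_map:` of A (with the proof that every key is a key)
def fpcA_outer (pm : PySem.Dict String (Option String)) (ks : List String)
    (color : PySem.Dict String Int) (cycles : List (List String))
    (hks : ∀ x ∈ ks, x ∈ pm.keys) : List (List String) :=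
  match ks with
  | [] => cycles
  | s :: rest =>
    if color.getD s 0 ≠ 0 then
      fpcA_outer pm rest color cycles (fun x hx => hks x (List.mem_cons_of_mem _ hx))
    else
      let r := fpcA_loop pm color cycles [s] []
        (fun x hx => by simpa [List.mem_singleton.mp hx] using hks s List.mem_cons_self)
      fpcA_outer pm rest r.1 r.2 (fun x hx => hks x (List.mem_cons_of_mem _ hx))

def find_parent_cycles (parent_map : List (String × Option String)) : List (List String) :=
  fpcA_outer (PySem.Dict.ofList parent_map) (PySem.Dict.ofList parent_map).keys
    PySem.Dict.empty [] (fun _ hx => hx)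

-- ===== PORT B =====
-- The `while True:` chain walk of B; returns (color, cycles, path).
-- `pos[parent]` cannot raise a KeyError (parent is VISITING hence on the path,
-- whose nodes are all pos keys), so the `.getD … 0` default is unreachable.
def fpcB_walk (pm : PySem.Dict String (Option String)) (color : PySem.Dict String Int)
    (cycles : List (List String)) (path : List String) (pos : PySem.Dict String Int)
    (node : String) (hn : node ∈ pm.keys) (hu : color.getD node 0 = 0) :
    PySem.Dict String Int × List (List String) × List String :=
  -- color[node] = VISITING; pos[node] = len(path); path.append(node)
  match pm.getD node none with
  | none => (color.insert node 1, cycles, path ++ [node])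
  | some parent =>
    if hpin : pm.contains parent then
      if (color.insert node 1).getD parent 0 = 1 then
        ((color.insert node 1),
         cycles ++ [PySem.List.slice (path ++ [node])
             (some ((pos.insert node (path.length : Int)).getD parent 0)) none ++ [parent]],
         path ++ [node])
      else if hp0 : (color.insert node 1).getD parent 0 = 0 then
        fpcB_walk pm (color.insert node 1) cycles (path ++ [node])
          (pos.insert node (path.length : Int)) parent
          ((PySem.Dict.contains_iff_mem_keys _ _).mp hpin) hp0
      else (color.insert node 1, cycles, path ++ [node])
    else (color.insert node 1, cycles, path ++ [node])
termination_by pm.keys.countP (fun k => color.getD k 0 == 0)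
decreasing_by
  simp_wf
  exact countU_insert_lt pm color node 1 hn hu (by decide)

-- `for start in parent_map:` of B; after each walk, `for n in path: color[n] = DONE`
def fpcB_outer (pm : PySem.Dict String (Option String)) (ks : List String)
    (color : PySem.Dict String Int) (cycles : List (List String))
    (hks : ∀ x ∈ ks, x ∈ pm.keys) : List (List String) :=
  match ks with
  | [] => cycles
  | s :: rest =>
    if h : color.getD s 0 ≠ 0 then
      fpcB_outer pm rest color cycles (fun x hx => hks x (List.mem_cons_of_mem _ hx))
    else
      let r := fpcB_walk pm color cycles [] PySem.Dict.empty s (hks s List.mem_cons_self)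
        (of_not_not h)
      fpcB_outer pm rest (r.2.2.foldl (fun c n => c.insert n 2) r.1) r.2.1
        (fun x hx => hks x (List.mem_cons_of_mem _ hx))

def find_parent_cycles_alt (parent_map : List (String × Option String)) : List (List String) :=
  fpcB_outer (PySem.Dict.ofList parent_map) (PySem.Dict.ofList parent_map).keys
    PySem.Dict.empty [] (fun _ hx => hx)

-- ===== PRECONDITION & SPEC =====
def Spec_find_parent_cycles (parent_map : List (String × Option String)) (out : List (List String)) : Prop := out = find_parent_cycles_alt parent_map
instance (parent_map : List (String × Option String)) (out : List (List String)) : Decidable (Spec_find_parent_cycles parent_map out) := by unfold Spec_find_parent_cycles; infer_instance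

-- ===== CLAIM (what is proved, stated in full; the proofs are below) =====
def Claim_equal_find_parent_cycles : Prop := ∀ (parent_map : List (String × Option String)), Dom_find_parent_cycles parent_map → Spec_find_parent_cycles parent_map (find_parent_cycles parent_map)

-- ===== LEMMAS AND PROOFS =====

-- `for n in path: color[n] = DONE` (B) only changes lookups on `path`
lemma markDone_getD (P : List String) :
    ∀ (c : PySem.Dict String Int) (x : String),
      (P.foldl (fun c n => c.insert n 2) c).getD x 0 = if x ∈ P then 2 else c.getD x 0 := by
  induction P with
  | nil => intro c x; simp
  | cons p t ih =>
    intro c x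
    simp only [List.foldl_cons, ih, PySem.Dict.getD_insert, List.mem_cons]
    by_cases hx : x ∈ t
    · simp [hx]
    · by_cases hp : x = p <;> simp [hx, hp]

-- A's unwinding phase: once stack = path and every entry is colored, the loop
-- only pops, marking everything on the path DONE and adding no cycle
lemma unwindA (pm : PySem.Dict String (Option String)) (path : List String) :
    ∀ (c : PySem.Dict String Int) (cycles : List (List String))
      (h : ∀ x ∈ path, x ∈ pm.keys),
      (∀ x ∈ path, c.getD x 0 ≠ 0) →
      ∃ c', fpcA_loop pm c cycles path path h = (c', cycles) ∧
        ∀ x, c'.getD x 0 = if x ∈ path then 2 else c.getD x 0 := by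
  induction path using List.reverseRecOn with
  | nil =>
    intro c cycles h _
    refine ⟨c, ?_, by intro x; simp⟩
    rw [fpcA_loop.eq_def]; simp
  | append_singleton q a ih =>
    intro c cycles h hNZ
    have hne : q ++ [a] ≠ [] := by simp
    have hcNZ : ¬ c.getD a 0 = 0 := hNZ a (by simp)
    rw [fpcA_loop.eq_def]
    simp only [dif_neg hne, List.getLast_concat, dif_neg hcNZ, List.dropLast_concat]
    have hpop : popIfLast (q ++ [a]) a = q := by simp [popIfLast]
    rw [hpop]
    obtain ⟨c', heq, hget⟩ := ih (c.insert a 2) cycles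
      (fun x hx => h x (List.mem_append_left _ hx))
      (fun x hx => by
        rw [PySem.Dict.getD_insert]
        by_cases hxa : x = a
        · simp [hxa]
        · simpa [hxa] using hNZ x (List.mem_append_left _ hx))
    refine ⟨c', heq, fun x => ?_⟩
    rw [hget x, PySem.Dict.getD_insert]
    by_cases hq : x ∈ q
    · simp [hq]
    · by_cases hxa : x = a <;> simp [hq, hxa]

-- A's "this node is finished" continuation: mark node DONE, pop, and unwind
lemma finishA (pm : PySem.Dict String (Option String)) (cA : PySem.Dict String Int)
    (cycles : List (List String)) (path : List String) (node : String)
    (h : ∀ x ∈ path, x ∈ pm.keys) (hnm : node ∉ path)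
    (hvis : ∀ x ∈ path, cA.getD x 0 = 1) :
    ∃ cA', fpcA_loop pm ((cA.insert node 1).insert node 2) cycles path path h = (cA', cycles) ∧
      ∀ x, cA'.getD x 0 = if x ∈ path ++ [node] then 2 else cA.getD x 0 := by
  have hins : ∀ x, ((cA.insert node 1).insert node 2).getD x 0
      = if x = node then 2 else cA.getD x 0 := by
    intro x; rw [PySem.Dict.insert_insert_self, PySem.Dict.getD_insert]
  obtain ⟨c', heq, hget⟩ := unwindA pm path ((cA.insert node 1).insert node 2) cycles h
    (fun x hx => by
      rw [hins x]
      have hxn : x ≠ node := fun hh => hnm (hh ▸ hx)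
      simp [hxn, hvis x hx])
  refine ⟨c', heq, fun x => ?_⟩
  rw [hget x, hins x]
  by_cases hq : x ∈ path
  · simp [hq]
  · by_cases hxa : x = node <;> simp [hq, hxa]

-- the main simulation: from a fresh node on top of a VISITING path, A's stack
-- loop and B's chain walk produce the same cycles and equivalent colorings
lemma walk_eq (pm : PySem.Dict String (Option String)) :
    ∀ (n : Nat) (cA cB : PySem.Dict String Int) (cycles : List (List String))
      (path : List String) (pos : PySem.Dict String Int) (node : String)
      (hA : ∀ x ∈ path ++ [node], x ∈ pm.keys)
      (hn : node ∈ pm.keys) (hu : cB.getD node 0 = 0),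
      pm.keys.countP (fun k => cA.getD k 0 == 0) ≤ n →
      (∀ x, cA.getD x 0 = cB.getD x 0) →
      (∀ x, cA.getD x 0 = 1 ↔ x ∈ path) →
      path.Nodup →
      (∀ (i : Nat) (hi : i < path.length), pos.get? path[i] = some (i : Int)) →
      cA.getD node 0 = 0 →
      ∃ (cyc : List (List String)) (cA' cB' : PySem.Dict String Int) (P : List String),
        fpcA_loop pm cA cycles (path ++ [node]) path hA = (cA', cycles ++ cyc) ∧
        fpcB_walk pm cB cycles path pos node hn hu = (cB', cycles ++ cyc, P) ∧
        (∀ x ∈ path ++ [node], x ∈ P) ∧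
        (∀ x, cA'.getD x 0 = if x ∈ P then 2 else cA.getD x 0) ∧
        (∀ x, cB'.getD x 0 = if x ∈ P then 1 else cB.getD x 0) := by
  intro n
  induction n with
  | zero =>
    intro cA cB cycles path pos node hA hn hu hcnt _ _ _ _ hA0
    exfalso
    have : 0 < pm.keys.countP (fun k => cA.getD k 0 == 0) :=
      List.countP_pos_iff.mpr ⟨node, hn, by simp [hA0]⟩
    omega
  | succ n ih =>
    intro cA cB cycles path pos node hA hn hu hcnt H1 H2 H3 H6 hA0
    have hnm : node ∉ path := by
      intro hmem
      have h1 := (H2 node).mpr hmem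
      rw [hA0] at h1
      exact absurd h1 (by norm_num)
    have hvis : ∀ x ∈ path, cA.getD x 0 = 1 := fun x hx => (H2 x).mpr hx
    have hne : path ++ [node] ≠ [] := by simp
    -- lookups of cB.insert node 1 described on all of path ++ [node]
    have hBget : ∀ x, (cB.insert node 1).getD x 0
        = if x ∈ path ++ [node] then 1 else cB.getD x 0 := by
      intro x
      rw [PySem.Dict.getD_insert]
      by_cases hxn : x = node
      · simp [hxn]
      · by_cases hxp : x ∈ path
        · have hcb : cB.getD x 0 = 1 := by rw [← H1 x]; exact hvis x hxp
          simp [hxn, hxp, hcb]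
        · simp [hxn, hxp]
    rcases hp : pm.getD node none with _ | parent
    · -- parent is None: both finish this start without a cycle
      obtain ⟨cA', heqA, hgA⟩ := finishA pm cA cycles path node
        (fun x hx => hA x (List.mem_append_left _ hx)) hnm hvis
      refine ⟨[], cA', cB.insert node 1, path ++ [node], ?_, ?_, fun x hx => hx, hgA, hBget⟩
      · rw [fpcA_loop.eq_def]
        simp only [dif_neg hne, List.getLast_concat, dif_pos hA0, hp, List.dropLast_concat]
        have hpop : popIfLast (path ++ [node]) node = path := by simp [popIfLast]
        rw [hpop, List.append_nil]
        exact heqA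
      · rw [fpcB_walk.eq_def]
        simp only [hp, List.append_nil]
    · by_cases hpin : pm.contains parent = true
      · have hqeq : (cA.insert node 1).getD parent 0 = (cB.insert node 1).getD parent 0 := by
          rw [PySem.Dict.getD_insert, PySem.Dict.getD_insert]
          by_cases hpn : parent = node <;> simp [hpn, H1 parent]
        by_cases h1 : (cA.insert node 1).getD parent 0 = 1
        · -- back-edge into the active path: one cycle, then both finish
          have hK : ∃ K : Nat,
              PySem.List.index? (path ++ [node]) parent = some K ∧
              (pos.insert node ((path.length : Int))).getD parent 0 = (K : Int) := by
            by_cases hpn : parent = node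
            · refine ⟨path.length, ?_, ?_⟩
              · rw [hpn]; exact PySem.List.index?_append_singleton_self _ _ hnm
              · rw [hpn, PySem.Dict.getD_insert_self]
            · have hpmem : parent ∈ path := (H2 parent).mp (by
                rw [PySem.Dict.getD_insert] at h1; simpa [hpn] using h1)
              obtain ⟨K, hk⟩ := Option.isSome_iff_exists.mp
                ((PySem.List.index?_isSome_iff _ _).mpr hpmem)
              obtain ⟨hkl, hgetk, -⟩ := PySem.List.getElem_of_index?_eq_some hk
              have hposk := H6 K hkl
              rw [hgetk] at hposk
              refine ⟨K, ?_, ?_⟩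
              · rw [PySem.List.index?_append_of_mem _ hpmem, hk]
              · rw [PySem.Dict.getD_insert, if_neg hpn]
                exact PySem.Dict.getD_of_get?_eq_some _ _ hposk
          obtain ⟨K, hidx, hpos⟩ := hK
          obtain ⟨cA', heqA, hgA⟩ := finishA pm cA
            (cycles ++ [PySem.List.slice (path ++ [node]) (some (K : Int)) none ++ [parent]])
            path node (fun x hx => hA x (List.mem_append_left _ hx)) hnm hvis
          refine ⟨[PySem.List.slice (path ++ [node]) (some (K : Int)) none ++ [parent]],
            cA', cB.insert node 1, path ++ [node], ?_, ?_, fun x hx => hx, hgA, hBget⟩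
          · rw [fpcA_loop.eq_def]
            simp only [dif_neg hne, List.getLast_concat, dif_pos hA0, hp, dif_pos hpin,
              if_pos h1, hidx, Option.getD_some, List.dropLast_concat]
            have hpop : popIfLast (path ++ [node]) node = path := by simp [popIfLast]
            rw [hpop]
            exact heqA
          · rw [fpcB_walk.eq_def]
            simp only [hp, dif_pos hpin, if_pos (hqeq ▸ h1), hpos]
        · by_cases h0 : (cA.insert node 1).getD parent 0 = 0
          · -- parent UNVISITED and a key: both step to the parent
            have hpn : parent ≠ node := by
              intro he
              rw [PySem.Dict.getD_insert, if_pos he] at h0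
              exact absurd h0 (by norm_num)
            have hpk : parent ∈ pm.keys := (PySem.Dict.contains_iff_mem_keys _ _).mp hpin
            have hA' : ∀ x ∈ (path ++ [node]) ++ [parent], x ∈ pm.keys := by
              intro x hx
              rcases List.mem_append.mp hx with h | h
              · exact hA x h
              · simpa [List.mem_singleton.mp h] using hpk
            have hcnt' : pm.keys.countP (fun k => (cA.insert node 1).getD k 0 == 0) ≤ n := by
              have := countU_insert_lt pm cA node 1 hn hA0 (by decide)
              omega
            have hq0b : (cB.insert node 1).getD parent 0 = 0 := by rw [← hqeq]; exact h0
            obtain ⟨cyc, cA'', cB'', P, eqA, eqB, hcov, hgA2, hgB2⟩ :=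
              ih (cA.insert node 1) (cB.insert node 1) cycles (path ++ [node])
                (pos.insert node ((path.length : Int))) parent hA' hpk hq0b
                hcnt'
                (by intro x
                    rw [PySem.Dict.getD_insert, PySem.Dict.getD_insert]
                    by_cases hxn : x = node <;> simp [hxn, H1 x])
                (by intro x
                    rw [PySem.Dict.getD_insert]
                    by_cases hxn : x = node
                    · simp [hxn]
                    · simp [hxn, H2 x])
                (by simp [List.nodup_append, H3]
                    intro a ha he
                    exact hnm (he ▸ ha))
                (by intro i hi
                    have hlen : i < path.length + 1 := by simpa using hi
                    by_cases hilt : i < path.length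
                    · have hgl : (path ++ [node])[i] = path[i] :=
                        List.getElem_append_left hilt
                      have hxn : path[i] ≠ node := fun he => hnm (he ▸ List.getElem_mem hilt)
                      rw [hgl, PySem.Dict.get?_insert_of_ne _ _ hxn]
                      exact H6 i hilt
                    · have hieq : i = path.length := by omega
                      subst hieq
                      rw [List.getElem_concat_length rfl, PySem.Dict.get?_insert_self])
                h0
            refine ⟨cyc, cA'', cB'', P, ?_, ?_, ?_, ?_, ?_⟩
            · rw [fpcA_loop.eq_def]
              simp only [dif_neg hne, List.getLast_concat, dif_pos hA0, hp, dif_pos hpin,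
                if_neg h1, if_pos h0]
              exact eqA
            · rw [fpcB_walk.eq_def]
              simp only [hp, dif_pos hpin, if_neg (hqeq ▸ h1), dif_pos hq0b]
              exact eqB
            · intro x hx
              exact hcov x (List.mem_append_left _ hx)
            · intro x
              rw [hgA2 x, PySem.Dict.getD_insert]
              by_cases hxP : x ∈ P
              · simp [hxP]
              · have hxn : x ≠ node :=
                  fun he => hxP (he ▸ hcov node (by simp))
                simp [hxP, hxn]
            · intro x
              rw [hgB2 x, PySem.Dict.getD_insert]
              by_cases hxP : x ∈ P
              · simp [hxP]
              · have hxn : x ≠ node :=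
                  fun he => hxP (he ▸ hcov node (by simp))
                simp [hxP, hxn]
          · -- parent already DONE: finish without a cycle
            obtain ⟨cA', heqA, hgA⟩ := finishA pm cA cycles path node
              (fun x hx => hA x (List.mem_append_left _ hx)) hnm hvis
            refine ⟨[], cA', cB.insert node 1, path ++ [node], ?_, ?_, fun x hx => hx, hgA, hBget⟩
            · rw [fpcA_loop.eq_def]
              simp only [dif_neg hne, List.getLast_concat, dif_pos hA0, hp, dif_pos hpin,
                if_neg h1, if_neg h0, List.dropLast_concat]
              have hpop : popIfLast (path ++ [node]) node = path := by simp [popIfLast]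
              rw [hpop, List.append_nil]
              exact heqA
            · rw [fpcB_walk.eq_def]
              simp only [hp, dif_pos hpin, if_neg (hqeq ▸ h1), List.append_nil]
              rw [dif_neg (by rw [← hqeq]; exact h0)]
      · -- parent not a key: finish without a cycle
        obtain ⟨cA', heqA, hgA⟩ := finishA pm cA cycles path node
          (fun x hx => hA x (List.mem_append_left _ hx)) hnm hvis
        refine ⟨[], cA', cB.insert node 1, path ++ [node], ?_, ?_, fun x hx => hx, hgA, hBget⟩
        · rw [fpcA_loop.eq_def]
          simp only [dif_neg hne, List.getLast_concat, dif_pos hA0, hp, dif_neg hpin,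
            List.dropLast_concat]
          have hpop : popIfLast (path ++ [node]) node = path := by simp [popIfLast]
          rw [hpop, List.append_nil]
          exact heqA
        · rw [fpcB_walk.eq_def]
          simp only [hp, dif_neg hpin, List.append_nil]

-- the outer `for start in parent_map` loops agree given lookup-equal colorings
lemma outer_eq (pm : PySem.Dict String (Option String)) :
    ∀ (ks : List String) (cA cB : PySem.Dict String Int) (cycles : List (List String))
      (hks : ∀ x ∈ ks, x ∈ pm.keys),
      (∀ x, cA.getD x 0 = cB.getD x 0) →
      (∀ x, cA.getD x 0 ≠ 1) →
      fpcA_outer pm ks cA cycles hks = fpcB_outer pm ks cB cycles hks := by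
  intro ks
  induction ks with
  | nil => intro cA cB cycles hks _ _; rfl
  | cons s rest ih =>
    intro cA cB cycles hks H1 Hnv
    rw [fpcA_outer, fpcB_outer]
    by_cases hskip : cA.getD s 0 ≠ 0
    · rw [if_pos hskip, dif_pos (by rw [← H1 s]; exact hskip)]
      exact ih _ _ _ _ H1 Hnv
    · rw [if_neg hskip, dif_neg (by rw [← H1 s]; exact hskip)]
      have h0 : cA.getD s 0 = 0 := of_not_not hskip
      obtain ⟨cyc, cA', cB', P, eqA, eqB, hcov, hgA, hgB⟩ :=
        walk_eq pm (pm.keys.countP (fun k => cA.getD k 0 == 0)) cA cB cycles [] PySem.Dict.empty s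
          (by intro x hx; simpa [List.mem_singleton.mp (by simpa using hx)] using hks s List.mem_cons_self)
          (hks s List.mem_cons_self) (by rw [← H1 s]; exact h0)
          le_rfl H1
          (by intro x; constructor
              · intro hx1; exact absurd hx1 (Hnv x)
              · intro hx; cases hx)
          List.nodup_nil
          (by intro i hi; cases hi)
          h0
      simp only [List.nil_append] at eqA
      simp only [eqA, eqB]
      apply ih
      · intro x
        rw [markDone_getD P cB' x, hgA x, hgB x]
        by_cases hx : x ∈ P <;> simp [hx, H1 x]
      · intro x
        rw [hgA x]
        by_cases hx : x ∈ P <;> simp [hx, Hnv x]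


-- ===== VERDICT (by name: the statement is the Claim_ definition above) =====
theorem find_parent_cycles_spec : Claim_equal_find_parent_cycles := by
  intro parent_map _
  unfold Spec_find_parent_cycles find_parent_cycles find_parent_cycles_alt
  apply outer_eq
  · intro x; rfl
  · intro x; simp [PySem.Dict.getD_empty]
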